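-- pv_equiv track=rewrite | github.com/k-harada/AtCoder | ABC/ABC151-200/ABC179/C.py | solve
-- ===== SOURCE A (Python) =====
-- def solve(n):
--     res = 0
--     for i in range(1, n + 1):
--         for j in range(1, n + 1):
--             if i * j >= n:
--                 break
--             res += 1
--     return res
-- ===== SOURCE B (Python) =====
-- def solve(n):
--     m = n - 1
--     return sum(m // i for i in range(1, n + 1))
-- ===== Notes on version B (the rewrite author's own statement) =====
-- stated objective: faster
-- what changed: Replaces the inner break-loop over j by the closed form (n-1)//i, summing it in a single pass over i.
import Mathlib
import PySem

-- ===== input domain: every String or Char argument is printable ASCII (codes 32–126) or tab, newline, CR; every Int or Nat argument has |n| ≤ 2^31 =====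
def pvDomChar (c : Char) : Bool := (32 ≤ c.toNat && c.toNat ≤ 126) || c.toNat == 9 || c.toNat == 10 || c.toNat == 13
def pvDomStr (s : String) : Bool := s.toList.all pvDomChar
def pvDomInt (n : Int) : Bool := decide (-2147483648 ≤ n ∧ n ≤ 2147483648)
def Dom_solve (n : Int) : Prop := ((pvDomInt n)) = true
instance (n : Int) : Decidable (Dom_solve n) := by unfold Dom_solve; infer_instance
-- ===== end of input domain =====

-- B replaces A's inner break-loop over j by the closed form (n-1)//i in a single pass over i (objective: faster).

-- ===== PORT A =====
-- inner 'for j in range(1, n+1): if i*j >= n: break; res += 1' — recursion with early exit, as in A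
def solveInner (n i : Int) : List Int → Int → Int
  | [], res => res
  | j :: rest, res => if i * j ≥ n then res else solveInner n i rest (res + 1)

def solve (n : Int) : Int :=
  (PySem.List.pyRange 1 (n + 1) 1).foldl
    (fun res i => solveInner n i (PySem.List.pyRange 1 (n + 1) 1) res) 0

-- ===== PORT B =====
def solve_alt (n : Int) : Int :=
  (PySem.List.pyRange 1 (n + 1) 1).foldl
    (fun acc i => acc + PySem.Int.floordiv (n - 1) i) 0

-- ===== PRECONDITION & SPEC =====
def Spec_solve (n : Int) (out : Int) : Prop := out = solve_alt n
instance (n : Int) (out : Int) : Decidable (Spec_solve n out) := by unfold Spec_solve; infer_instance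

-- ===== CLAIM (what is proved, stated in full; the proofs are below) =====
def Claim_equal_solve : Prop := ∀ (n : Int), Dom_solve n → Spec_solve n (solve n)

-- ===== LEMMAS AND PROOFS =====

-- A's inner loop over the tail range [a, n] counts the j with i*j < n, i.e. j ≤ (n-1)//i.
theorem solveInner_range (n i : Int) (hi : 0 < i) :
    ∀ (k : Nat) (a res : Int), 1 ≤ a → (n + 1 - a).toNat = k →
      solveInner n i (PySem.List.pyRange a (n + 1) 1) res =
        res + max 0 (min (n + 1) (PySem.Int.floordiv (n - 1) i + 1) - a) := by
  intro k
  induction k with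
  | zero =>
    intro a res ha hk
    rw [PySem.List.pyRange_one_eq_nil (by omega)]
    simp only [solveInner]
    omega
  | succ k ih =>
    intro a res ha hk
    rw [PySem.List.pyRange_one_cons (by omega)]
    simp only [solveInner]
    by_cases hc : i * a ≥ n
    · rw [if_pos hc]
      have hKa : PySem.Int.floordiv (n - 1) i < a :=
        (PySem.Int.floordiv_lt_iff_lt_mul hi).mpr (by rw [mul_comm i a] at hc; omega)
      omega
    · rw [if_neg hc]
      have haK : a ≤ PySem.Int.floordiv (n - 1) i :=
        (PySem.Int.le_floordiv_iff_mul_le hi).mpr (by rw [mul_comm i a] at hc; omega)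
      rw [ih (a + 1) (res + 1) (by omega) (by omega)]
      omega

theorem solveInner_eq (n i : Int) (hi : 1 ≤ i) (hin : i ≤ n) (res : Int) :
    solveInner n i (PySem.List.pyRange 1 (n + 1) 1) res = res + PySem.Int.floordiv (n - 1) i := by
  have h0 : (0 : Int) ≤ PySem.Int.floordiv (n - 1) i :=
    (PySem.Int.le_floordiv_iff_mul_le (by omega)).mpr (by simp; omega)
  have h1 : PySem.Int.floordiv (n - 1) i < n + 1 :=
    (PySem.Int.floordiv_lt_iff_lt_mul (by omega)).mpr (by nlinarith)
  rw [solveInner_range n i (by omega) (n + 1 - 1).toNat 1 res (le_refl 1) rfl]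
  omega

-- ===== VERDICT (by name: the statement is the Claim_ definition above) =====
theorem solve_spec : Claim_equal_solve := by
  intro n _
  unfold Spec_solve solve solve_alt
  apply PySem.List.foldl_congr_mem
  intro res i hmem
  rw [PySem.List.mem_pyRange_one] at hmem
  exact solveInner_eq n i hmem.1 (by omega) res
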